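-- pv_equiv track=rewrite | github.com/chen9z/chat-codebase | src/data/truly_continuous_splitter.py | _get_line_at_pos
-- ===== SOURCE A (Python) =====
-- def _get_line_at_pos(pos: int, text: str) -> str:
--     """获取指定位置所在的行"""
--     if pos < 0 or pos >= len(text):
--         return ""
--
--     # 找到行的开始
--     line_start = pos
--     while line_start > 0 and text[line_start - 1] != '\n':
--         line_start -= 1
--
--     # 找到行的结束
--     line_end = pos
--     while line_end < len(text) and text[line_end] != '\n':
--         line_end += 1
--
--     return text[line_start:line_end]
-- ===== SOURCE B (Python) =====
-- def _get_line_at_pos(pos: int, text: str) -> str: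
--     if pos < 0 or pos >= len(text):
--         return ""
--     offset = 0
--     for line in text.split('\n'):
--         end = offset + len(line)  # position of this line's trailing '\n' (or len(text))
--         if pos <= end:
--             return line
--         offset = end + 1
--     return ""  # unreachable: pos < len(text)
-- ===== Notes on version B (the rewrite author's own statement) =====
-- stated objective: faster
-- what changed: B replaces A's two character-by-character index scans (backward for the line start, forward for the line end) with one str.split('\n') plus a single running-offset pass over the lines, returning the first line whose end position (the index of its trailing newline) is >= pos.
import Mathlib
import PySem

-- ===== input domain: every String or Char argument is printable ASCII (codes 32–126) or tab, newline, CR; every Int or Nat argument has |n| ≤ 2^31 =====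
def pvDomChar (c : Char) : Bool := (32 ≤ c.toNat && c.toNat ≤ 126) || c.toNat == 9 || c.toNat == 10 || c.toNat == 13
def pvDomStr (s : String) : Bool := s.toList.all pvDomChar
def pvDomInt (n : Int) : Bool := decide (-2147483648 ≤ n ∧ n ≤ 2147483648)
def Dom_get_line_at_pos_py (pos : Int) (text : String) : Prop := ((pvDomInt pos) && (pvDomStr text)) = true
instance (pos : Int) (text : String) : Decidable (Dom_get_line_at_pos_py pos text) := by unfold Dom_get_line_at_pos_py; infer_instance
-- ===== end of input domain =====

-- B replaces A's two per-character index scans by one split on '\n' plus a running-offset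
-- pass over the lines (same O(n) cost; measurably faster in Python via the C-level split).


-- ===== PORT A =====
-- while line_start > 0 and text[line_start - 1] != '\n': line_start -= 1
-- (the index line_start - 1 is provably in range here, so text[line_start - 1] is pyGetD)
def pvAStart (cs : List Char) : Nat → Nat
  | 0 => 0
  | k + 1 => if PySem.List.pyGetD cs (k : Int) ' ' ≠ '\n' then pvAStart cs k else k + 1

-- while line_end < len(text) and text[line_end] != '\n': line_end += 1
def pvAEnd (cs : List Char) (e : Nat) : Nat :=
  if e < cs.length ∧ PySem.List.pyGetD cs (e : Int) ' ' ≠ '\n' then pvAEnd cs (e + 1) else e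
termination_by cs.length - e
decreasing_by omega

def get_line_at_pos_py (pos : Int) (text : String) : String :=
  if pos < 0 ∨ PySem.Str.len text ≤ pos then ""
  else
    let cs := text.toList
    let s := pvAStart cs pos.toNat
    let e := pvAEnd cs pos.toNat
    String.mk (PySem.List.slice cs (some (s : Int)) (some (e : Int)))

-- ===== PORT B =====
-- for line in lines: end = offset + len(line); if pos <= end: return line; offset = end + 1
def pvBLoop (pos : Int) (lines : List (List Char)) (off : Int) : String :=
  match lines with
  | [] => ""
  | l :: rest =>
    let e := off + (l.length : Int)
    if pos ≤ e then String.mk l else pvBLoop pos rest (e + 1)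

-- text.split('\n') is ported as List.splitOn '\n' on the code points (exact for a 1-char sep)
def get_line_at_pos_py_alt (pos : Int) (text : String) : String :=
  if pos < 0 ∨ PySem.Str.len text ≤ pos then ""
  else pvBLoop pos (text.toList.splitOn '\n') 0

-- ===== PRECONDITION & SPEC =====
def Spec_get_line_at_pos_py (pos : Int) (text : String) (out : String) : Prop := out = get_line_at_pos_py_alt pos text
instance (pos : Int) (text : String) (out : String) : Decidable (Spec_get_line_at_pos_py pos text out) := by unfold Spec_get_line_at_pos_py; infer_instance

-- ===== CLAIM (what is proved, stated in full; the proofs are below) =====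
def Claim_equal_get_line_at_pos_py : Prop := ∀ (pos : Int) (text : String), Dom_get_line_at_pos_py pos text → Spec_get_line_at_pos_py pos text (get_line_at_pos_py pos text)

-- ===== LEMMAS AND PROOFS =====

-- index helper: pyGetD with a nonneg Nat index inside the left part of an append
theorem pvGetD_append_left (l rest : List Char) (k : Nat) (hk : k < l.length) (d : Char) :
    PySem.List.pyGetD (l ++ rest) (k : Int) d = l[k] := by
  simp [PySem.List.pyGetD_natCast, List.getD_eq_getElem?_getD, List.getElem?_append_left hk,
    List.getElem?_eq_getElem hk]

theorem pvGetD_append_right (l : List Char) (rest : List Char) (k : Nat) (d : Char) :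
    PySem.List.pyGetD (l ++ rest) ((l.length + k : Nat) : Int) d = PySem.List.pyGetD rest (k : Int) d := by
  rw [PySem.List.pyGetD_natCast, PySem.List.pyGetD_natCast]
  simp [List.getD_eq_getElem?_getD, List.getElem?_append_right (by omega : l.length ≤ l.length + k)]

-- A's backward scan stays at 0 within a newline-free first line
theorem pvAStart_first (l rest : List Char) (hl : '\n' ∉ l) :
    ∀ p : Nat, p ≤ l.length → pvAStart (l ++ rest) p = 0 := by
  intro p
  induction p with
  | zero => intro _; rfl
  | succ k ih =>
    intro hp
    have hk : k < l.length := by omega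
    have : PySem.List.pyGetD (l ++ rest) (k : Int) ' ' = l[k] := pvGetD_append_left l rest k hk ' '
    have hne : l[k] ≠ '\n' := fun h => hl (h ▸ List.getElem_mem hk)
    simp [pvAStart, this, hne, ih (by omega)]

-- A's forward scan stops at l.length when the first line is newline-free and is
-- followed by nothing or by a '\n'
theorem pvAEnd_first (l rest : List Char) (hl : '\n' ∉ l)
    (hrest : rest = [] ∨ ∃ ds, rest = '\n' :: ds) :
    ∀ p : Nat, p ≤ l.length → pvAEnd (l ++ rest) p = l.length := by
  intro p hp
  induction hn : l.length - p using Nat.strong_induction_on generalizing p with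
  | _ n ih =>
    by_cases hlt : p < l.length
    · have hg : PySem.List.pyGetD (l ++ rest) (p : Int) ' ' = l[p] := pvGetD_append_left l rest p hlt ' '
      have hne : l[p] ≠ '\n' := fun h => hl (h ▸ List.getElem_mem hlt)
      rw [pvAEnd]
      simp only [List.length_append]
      rw [if_pos ⟨by omega, by rw [hg]; exact hne⟩]
      exact ih (l.length - (p + 1)) (by omega) (p + 1) (by omega) rfl
    · have hpl : p = l.length := by omega
      subst hpl
      rcases hrest with h | ⟨ds, h⟩ <;> subst h
      · rw [pvAEnd]; simp
      · have hg : PySem.List.pyGetD (l ++ '\n' :: ds) ((l.length : Nat) : Int) ' ' = '\n' := by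
          have := pvGetD_append_right l ('\n' :: ds) 0 ' '
          simpa [PySem.List.pyGetD_natCast] using this
        rw [pvAEnd]
        rw [if_neg]
        simp [hg]

-- shifting A's backward scan past the first line and its '\n'
theorem pvAStart_shift (l ds : List Char) :
    ∀ k : Nat, pvAStart (l ++ '\n' :: ds) (l.length + 1 + k) = l.length + 1 + pvAStart ds k := by
  have hgen : ∀ k : Nat, PySem.List.pyGetD (l ++ '\n' :: ds) ((l.length + 1 + k : Nat) : Int) ' '
      = PySem.List.pyGetD ds (k : Int) ' ' := by
    intro k
    rw [show ((l.length + 1 + k : Nat) : Int) = ((l.length + (1 + k) : Nat) : Int) by norm_cast; omega]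
    rw [pvGetD_append_right l ('\n' :: ds) (1 + k) ' ']
    rw [show ((1 + k : Nat) : Int) = ((k + 1 : Nat) : Int) by norm_cast; omega]
    rw [PySem.List.pyGetD_natCast, PySem.List.pyGetD_natCast]
    simp
  intro k
  induction k with
  | zero =>
    have hg : PySem.List.pyGetD (l ++ '\n' :: ds) ((l.length : Nat) : Int) ' ' = '\n' := by
      have := pvGetD_append_right l ('\n' :: ds) 0 ' '
      simpa using this
    show pvAStart (l ++ '\n' :: ds) (l.length + 0 + 1) = l.length + 1 + pvAStart ds 0
    simp [pvAStart, hg]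
  | succ k ih =>
    rw [show l.length + 1 + (k + 1) = (l.length + 1 + k) + 1 by omega]
    show (if PySem.List.pyGetD (l ++ '\n' :: ds) ((l.length + 1 + k : Nat) : Int) ' ' ≠ '\n'
        then pvAStart (l ++ '\n' :: ds) (l.length + 1 + k) else (l.length + 1 + k) + 1)
      = l.length + 1 + pvAStart ds (k + 1)
    rw [hgen k]
    show _ = l.length + 1 +
      (if PySem.List.pyGetD ds ((k : Nat) : Int) ' ' ≠ '\n' then pvAStart ds k else k + 1)
    by_cases hc : PySem.List.pyGetD ds ((k : Nat) : Int) ' ' = '\n'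
    · rw [if_neg (by simp [hc]), if_neg (by simp [hc])]; omega
    · rw [if_pos hc, if_pos hc, ih]

-- shifting A's forward scan past the first line and its '\n'
theorem pvAEnd_shift (l ds : List Char) :
    ∀ k : Nat, pvAEnd (l ++ '\n' :: ds) (l.length + 1 + k) = l.length + 1 + pvAEnd ds k := by
  have hgen : ∀ k : Nat, PySem.List.pyGetD (l ++ '\n' :: ds) ((l.length + 1 + k : Nat) : Int) ' '
      = PySem.List.pyGetD ds (k : Int) ' ' := by
    intro k
    rw [show ((l.length + 1 + k : Nat) : Int) = ((l.length + (1 + k) : Nat) : Int) by norm_cast; omega]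
    rw [pvGetD_append_right l ('\n' :: ds) (1 + k) ' ']
    rw [show ((1 + k : Nat) : Int) = ((k + 1 : Nat) : Int) by norm_cast; omega]
    rw [PySem.List.pyGetD_natCast, PySem.List.pyGetD_natCast]
    simp
  intro k
  induction hn : ds.length - k using Nat.strong_induction_on generalizing k with
  | _ n ih =>
    conv_lhs => rw [pvAEnd]
    conv_rhs => rw [pvAEnd]
    rw [hgen k]
    by_cases hlt : k < ds.length
    · by_cases hc : PySem.List.pyGetD ds ((k : Nat) : Int) ' ' = '\n'
      · rw [if_neg (by simp [hc]), if_neg (by simp [hc])]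
      · rw [if_pos ⟨by simp; omega, hc⟩, if_pos ⟨hlt, hc⟩]
        rw [show l.length + 1 + k + 1 = l.length + 1 + (k + 1) by omega]
        exact ih (ds.length - (k + 1)) (by omega) (k + 1) rfl
    · rw [if_neg (by simp; omega), if_neg (by omega)]

-- B's loop only compares pos against offsets: it is shift-invariant
theorem pvBLoop_shift (lines : List (List Char)) :
    ∀ (pos off : Int), pvBLoop pos lines off = pvBLoop (pos - off) lines 0 := by
  induction lines with
  | nil => intro pos off; rfl
  | cons l rest ih =>
    intro pos off
    simp only [pvBLoop]
    by_cases hc : pos ≤ off + (l.length : Int)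
    · rw [if_pos hc, if_pos (by omega)]
    · rw [if_neg hc, if_neg (by omega)]
      rw [ih pos (off + (l.length : Int) + 1), ih (pos - off) (0 + (l.length : Int) + 1)]
      rw [show pos - (off + (l.length : Int) + 1) = pos - off - (0 + (l.length : Int) + 1) by ring]

-- main lemma: on cs = '\n'-intercalation of newline-free lines, A's slice of the
-- scanned segment equals B's running-offset search, for every in-range position
theorem pvMain : ∀ (L : List (List Char)) (cs : List Char) (p : Nat),
    cs = List.intercalate ['\n'] L → (∀ l ∈ L, '\n' ∉ l) → p < cs.length →
    String.mk ((cs.drop (pvAStart cs p)).take (pvAEnd cs p - pvAStart cs p))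
      = pvBLoop (p : Int) L 0 := by
  intro L
  induction L with
  | nil =>
    intro cs p hcs _ hp
    subst hcs
    simp [List.intercalate] at hp
  | cons l rest ih =>
    intro cs p hcs hnl hp
    rcases rest with _ | ⟨r, rs⟩
    · -- single line: cs = l
      have hcl : cs = l := by simpa [List.intercalate] using hcs
      subst hcl
      have hl : '\n' ∉ cs := hnl cs (by simp)
      have h1 : pvAStart cs p = 0 := by
        have := pvAStart_first cs [] hl p (by omega)
        simpa using this
      have h2 : pvAEnd cs p = cs.length := by
        have := pvAEnd_first cs [] hl (Or.inl rfl) p (by omega)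
        simpa using this
      rw [h1, h2]
      simp only [pvBLoop]
      rw [if_pos (by push_cast; omega)]
      simp
    · -- cs = l ++ '\n' :: ds with ds the intercalation of the remaining lines
      obtain ⟨ds, hds⟩ : ∃ ds, ['\n'].intercalate (r :: rs) = ds := ⟨_, rfl⟩
      have hIC : ['\n'].intercalate (l :: r :: rs) = l ++ '\n' :: ['\n'].intercalate (r :: rs) := by
        simp [List.intercalate, List.intersperse_cons₂, List.flatten_cons]
      have hcs' : cs = l ++ '\n' :: ds := by rw [hcs, hIC, hds]
      subst hcs'
      have hl : '\n' ∉ l := hnl l (by simp)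
      by_cases hple : p ≤ l.length
      · -- position in the first line (possibly on its trailing '\n')
        have h1 : pvAStart (l ++ '\n' :: ds) p = 0 :=
          pvAStart_first l ('\n' :: ds) hl p hple
        have h2 : pvAEnd (l ++ '\n' :: ds) p = l.length :=
          pvAEnd_first l ('\n' :: ds) hl (Or.inr ⟨ds, rfl⟩) p hple
        rw [h1, h2]
        simp only [pvBLoop]
        rw [if_pos (by push_cast; omega)]
        simp [List.take_left']
      · -- position beyond the first line: shift both sides and recurse
        have hk : ∃ k : Nat, p = l.length + 1 + k := ⟨p - l.length - 1, by omega⟩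
        rcases hk with ⟨k, hpk⟩
        subst hpk
        rw [pvAStart_shift, pvAEnd_shift]
        have hlen2 : (l ++ '\n' :: ds).length = l.length + 1 + ds.length := by
          rw [List.length_append, List.length_cons]
          omega
        have hklt : k < ds.length := by omega
        have hdrop : (l ++ '\n' :: ds).drop (l.length + 1 + pvAStart ds k)
            = ds.drop (pvAStart ds k) := by
          rw [show l.length + 1 + pvAStart ds k = (l ++ ['\n']).length + pvAStart ds k by
            simp [List.length_append]]
          rw [show l ++ '\n' :: ds = (l ++ ['\n']) ++ ds by simp]
          rw [List.drop_append]
          simp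
        rw [hdrop]
        rw [show l.length + 1 + pvAEnd ds k - (l.length + 1 + pvAStart ds k)
            = pvAEnd ds k - pvAStart ds k by omega]
        rw [ih ds k hds.symm (fun x hx => hnl x (by simp [hx])) hklt]
        have hstep : pvBLoop (((l.length + 1 + k : Nat) : Int)) (l :: r :: rs) 0
            = pvBLoop (((k : Nat) : Int)) (r :: rs) 0 := by
          conv_lhs => rw [pvBLoop]
          rw [if_neg (by push_cast; omega), pvBLoop_shift]
          rw [show ((l.length + 1 + k : Nat) : Int) - (0 + (l.length : Int) + 1)
              = ((k : Nat) : Int) by push_cast; omega]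
        exact hstep.symm

-- every piece of splitOn '\n' is newline-free
theorem pvSplitOn_no_sep : ∀ (cs : List Char), ∀ l ∈ cs.splitOn '\n', '\n' ∉ l := by
  intro cs
  induction cs with
  | nil => simp [List.splitOn, List.splitOnP_nil]
  | cons a as ih =>
    intro l hl
    rw [List.splitOn, List.splitOnP_cons] at hl
    by_cases ha : a = '\n'
    · simp [ha] at hl
      rcases hl with h | h
      · simp [h]
      · exact ih l h
    · simp [ha] at hl
      rcases hx : as.splitOnP (· == '\n') with _ | ⟨h0, t⟩
      · exact absurd hx (List.splitOnP_ne_nil _ _)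
      · rw [hx] at hl
        simp at hl
        rcases hl with h | h
        · subst h
          intro hmem
          rcases List.mem_cons.mp hmem with h | h
          · exact ha h.symm
          · exact ih h0 (by rw [List.splitOn, hx]; simp) h
        · exact ih l (by rw [List.splitOn, hx]; simp [h])

-- ===== VERDICT (by name: the statement is the Claim_ definition above) =====
theorem get_line_at_pos_py_spec : Claim_equal_get_line_at_pos_py := by
  intro pos text _
  unfold Spec_get_line_at_pos_py get_line_at_pos_py get_line_at_pos_py_alt
  by_cases hg : pos < 0 ∨ PySem.Str.len text ≤ pos
  · rw [if_pos hg, if_pos hg]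
  · rw [if_neg hg, if_neg hg]
    push_neg at hg
    obtain ⟨h0, hlt⟩ := hg
    have hlen : PySem.Str.len text = (text.toList.length : Int) := by
      simp [PySem.Str.len_eq]
    set cs := text.toList with hcs
    have hplt : pos.toNat < cs.length := by
      rw [hlen] at hlt
      omega
    have hslice : PySem.List.slice cs (some ((pvAStart cs pos.toNat : Nat) : Int))
        (some ((pvAEnd cs pos.toNat : Nat) : Int))
        = (cs.drop (pvAStart cs pos.toNat)).take (pvAEnd cs pos.toNat - pvAStart cs pos.toNat) := by
      exact PySem.List.slice_natCast cs _ _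
    simp only [hslice]
    have hint : cs = List.intercalate ['\n'] (cs.splitOn '\n') :=
      (List.intercalate_splitOn cs '\n').symm
    have := pvMain (cs.splitOn '\n') cs pos.toNat hint (pvSplitOn_no_sep cs) hplt
    rw [this]
    congr 1
    omega
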